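-- pv_equiv track=rewrite | github.com/CoderAalok/Problem_Solving_In_Python | Sliding Window Algorithm/minimum_window_atleastK.py | minimum_window
-- ===== SOURCE A (Python) =====
-- def minimum_window(s:str, k:int) -> int:
--     # edge case
--     if not s or k <= 0:
--         return 0
--
--
--     left = 0
--     min_window = float('inf')
--     window = {}
--     # res = ""
--
--     for right in range(len(s)):
--         char = s[right]
--         window[char] = window.get(char, 0) + 1
--
--         while len(window) >= k:
--             min_window = min(min_window, right-left+1)
--             # if (right-left+1) < win_size:
--                 # res = s[left:right+1]
--
--             window[s[left]] -= 1
--             if window[s[left]] == 0: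
--                 del window[s[left]]
--
--             left += 1
--
--     return 0 if min_window == float('inf') else min_window
-- ===== SOURCE B (Python) =====
-- def minimum_window(s: str, k: int) -> int:
--     # For each right end r, scan left from r collecting distinct chars and stop at
--     # the nearest l whose window s[l..r] reaches k distinct; keep the shortest.
--     if not s or k <= 0:
--         return 0
--     best = 0
--     n = len(s)
--     for r in range(n):
--         seen = set()
--         for l in range(r, -1, -1):
--             seen.add(s[l])
--             if len(seen) >= k:
--                 cand = r - l + 1
--                 if best == 0 or cand < best:
--                     best = cand
--                 break
--     return best
-- ===== Notes on version B (the rewrite author's own statement) =====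
-- stated objective: alternative
-- what changed: A's single-pass two-pointer sliding window with a shared mutable count dict is replaced by an independent backward scan from each right end that collects distinct characters in a set and stops at the first (nearest) window reaching k distinct, keeping the shortest; no state is carried between right ends.
import Mathlib
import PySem

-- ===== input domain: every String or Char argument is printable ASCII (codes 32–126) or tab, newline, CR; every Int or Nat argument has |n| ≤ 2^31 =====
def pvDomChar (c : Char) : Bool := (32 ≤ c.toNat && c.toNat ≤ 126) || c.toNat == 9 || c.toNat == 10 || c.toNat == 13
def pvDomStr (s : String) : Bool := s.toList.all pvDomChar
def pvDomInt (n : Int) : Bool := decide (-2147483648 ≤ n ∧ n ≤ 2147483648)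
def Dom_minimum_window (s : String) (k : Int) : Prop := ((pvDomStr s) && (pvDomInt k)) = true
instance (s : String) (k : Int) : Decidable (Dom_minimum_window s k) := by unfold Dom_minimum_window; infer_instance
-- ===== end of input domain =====

-- B replaces A's amortized two-pointer sliding window by an independent backward scan
-- from each right end (with a set, stopping at the first window reaching k distinct);
-- objective: simpler per-step reasoning, no shared mutable window state. Not faster.

-- ===== PORT A =====
-- the inner 'while len(window) >= k' loop of A; fuel bounds the iterations (left ≤ len(s) always suffices)
def aShrink (cs : List Char) (k : Int) (right : Int) :
    Nat → Int × Option Int × PySem.Dict Char Int → Int × Option Int × PySem.Dict Char Int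
  | 0, st => st
  | fuel+1, (left, mw, w) =>
    if k ≤ (w.size : Int) then
      let newLen : Int := right - left + 1
      let mw' : Option Int := some (match mw with | none => newLen | some m => min m newLen)
      let lc := PySem.List.pyGetD cs left ' '
      let w' := w.insert lc (w.getD lc 0 - 1)
      let w'' := if w'.getD lc 0 = 0 then w'.erase lc else w'
      aShrink cs k right fuel (left + 1, mw', w'')
    else (left, mw, w)

def minimum_window (s : String) (k : Int) : Int :=
  let cs := s.toList
  if cs = [] ∨ k ≤ 0 then 0
  else
    let st := (PySem.List.pyRange 0 cs.length 1).foldl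
      (fun (st : Int × Option Int × PySem.Dict Char Int) right =>
        let c := PySem.List.pyGetD cs right ' '
        let w := st.2.2.insert c (st.2.2.getD c 0 + 1)
        aShrink cs k right (cs.length + 1) (st.1, st.2.1, w))
      (0, none, PySem.Dict.empty)
    match st.2.1 with
    | none => 0
    | some m => m

-- ===== PORT B =====
-- the inner 'for l in range(r, -1, -1)' loop of B, with its break on len(seen) >= k
def bInner (cs : List Char) (k : Int) (r : Int) :
    List Int → PySem.Set Char → Int → Int
  | [], _, best => best
  | l :: rest, seen, best =>
    let seen' := PySem.Set.add seen (PySem.List.pyGetD cs l ' ')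
    if k ≤ PySem.Set.len seen' then
      let cand : Int := r - l + 1
      if best = 0 ∨ cand < best then cand else best
    else bInner cs k r rest seen' best

def minimum_window_alt (s : String) (k : Int) : Int :=
  let cs := s.toList
  if cs = [] ∨ k ≤ 0 then 0
  else
    (PySem.List.pyRange 0 cs.length 1).foldl
      (fun best r => bInner cs k r (PySem.List.pyRange r (-1) (-1)) PySem.Set.empty best)
      0

-- ===== PRECONDITION & SPEC =====
def Spec_minimum_window (s : String) (k : Int) (out : Int) : Prop := out = minimum_window_alt s k
instance (s : String) (k : Int) (out : Int) : Decidable (Spec_minimum_window s k out) := by unfold Spec_minimum_window; infer_instance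

-- ===== CLAIM (what is proved, stated in full; the proofs are below) =====
def Claim_equal_minimum_window : Prop := ∀ (s : String) (k : Int), Dom_minimum_window s k → Spec_minimum_window s k (minimum_window s k)

-- ===== LEMMAS AND PROOFS =====

-- segment cs[l:r) and its number of distinct characters
def pvSeg (cs : List Char) (l r : Nat) : List Char := (cs.drop l).take (r - l)
def pvD (cs : List Char) (l r : Nat) : Nat := (pvSeg cs l r).toFinset.card

theorem pvSeg_eq_nil {cs : List Char} {l r : Nat} (h : r ≤ l) : pvSeg cs l r = [] := by
  simp [pvSeg, Nat.sub_eq_zero_of_le h]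

theorem pvSeg_eq_nil' {cs : List Char} {l r : Nat} (h : cs.length ≤ l) : pvSeg cs l r = [] := by
  simp [pvSeg, List.drop_eq_nil_of_le h]

theorem pvSeg_cons {cs : List Char} {l r : Nat} (h1 : l < r) (h2 : l < cs.length) :
    pvSeg cs l r = cs[l] :: pvSeg cs (l+1) r := by
  unfold pvSeg
  rw [List.drop_eq_getElem_cons h2, show r - l = (r - (l+1)) + 1 by omega, List.take_succ_cons]

theorem pvSeg_snoc {cs : List Char} {l r : Nat} (h1 : l ≤ r) (h2 : r < cs.length) :
    pvSeg cs l (r+1) = pvSeg cs l r ++ [cs[r]] := by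
  unfold pvSeg
  rw [show r + 1 - l = (r - l) + 1 by omega, List.take_add_one]
  have : (cs.drop l)[r - l]? = some cs[r] := by
    rw [List.getElem?_drop, show l + (r - l) = r by omega]
    exact List.getElem?_eq_getElem h2
  simp [this]

theorem pvSeg_ne_nil {cs : List Char} {l r : Nat} (h : pvSeg cs l r ≠ []) :
    l < r ∧ l < cs.length := by
  rcases Nat.lt_or_ge l r with h1 | h1
  · rcases Nat.lt_or_ge l cs.length with h2 | h2
    · exact ⟨h1, h2⟩
    · exact absurd (pvSeg_eq_nil' h2) h
  · exact absurd (pvSeg_eq_nil h1) h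

theorem pvSeg_subset_succ {cs : List Char} {l r : Nat} : pvSeg cs (l+1) r ⊆ pvSeg cs l r := by
  intro c hc
  rcases Nat.lt_or_ge l r with h1 | h1
  · rcases Nat.lt_or_ge l cs.length with h2 | h2
    · rw [pvSeg_cons h1 h2]; exact List.mem_cons_of_mem _ hc
    · rw [pvSeg_eq_nil' (by omega)] at hc; cases hc
  · rw [pvSeg_eq_nil (by omega)] at hc; cases hc

theorem pvD_antitone {cs : List Char} {l l' r : Nat} (h : l ≤ l') : pvD cs l' r ≤ pvD cs l r := by
  induction l', h using Nat.le_induction with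
  | base => exact Nat.le_refl _
  | succ m hm ih =>
    refine Nat.le_trans ?_ ih
    exact Finset.card_le_card (fun c hc => by
      simp only [List.mem_toFinset] at hc ⊢
      exact pvSeg_subset_succ hc)

theorem pvD_pos_lt {cs : List Char} {l r : Nat} (h : 0 < pvD cs l r) :
    l < r ∧ l < cs.length := by
  have : pvSeg cs l r ≠ [] := by
    intro hnil
    simp [pvD, hnil] at h
  exact pvSeg_ne_nil this

-- A's window dict represents the character counter of a segment t
def pvRep (w : PySem.Dict Char Int) (t : List Char) : Prop :=
  w.keys.Nodup ∧ ∀ c : Char, w.get? c = if t.count c = 0 then none else some ((t.count c : Int))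

theorem pvRep_empty : pvRep PySem.Dict.empty [] := by
  refine ⟨PySem.Dict.nodup_keys_empty, fun c => ?_⟩
  simp [PySem.Dict.get?_empty]

theorem pvGet?_erase_self (d : PySem.Dict Char Int) (c : Char) : (d.erase c).get? c = none := by
  simp only [PySem.Dict.erase, PySem.Dict.get?]
  rw [List.find?_eq_none.mpr]
  · rfl
  · intro p hp
    have := (List.mem_filter.mp hp).2
    simpa using this

theorem pvGet?_erase_of_ne (d : PySem.Dict Char Int) {c c' : Char} (h : c' ≠ c) :
    (d.erase c).get? c' = d.get? c' := by
  simp only [PySem.Dict.erase, PySem.Dict.get?]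
  congr 1
  induction d.items with
  | nil => rfl
  | cons p rest ih =>
    by_cases hp : p.1 = c
    · have h1 : (!p.1 == c) = false := by simp [hp]
      have h2 : (p.1 == c') = false := by simp [hp]; exact fun hh => h hh.symm
      simp [h1, h2, ih]
    · have h1 : (!p.1 == c) = true := by simp [hp]
      by_cases hq : p.1 = c'
      · simp [h1, hq, h]
      · have h2 : (p.1 == c') = false := by simp [hq]
        simp [h1, h2, ih]

theorem pvKeys_erase_sublist (d : PySem.Dict Char Int) (c : Char) :
    (d.erase c).keys.Sublist d.keys := by
  simp only [PySem.Dict.erase, PySem.Dict.keys]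
  exact List.Sublist.map _ List.filter_sublist

theorem pvRep_size {w : PySem.Dict Char Int} {t : List Char} (h : pvRep w t) :
    w.size = t.toFinset.card := by
  obtain ⟨hnd, hget⟩ := h
  have hkeys : ∀ c : Char, c ∈ w.keys ↔ c ∈ t := by
    intro c
    rw [← List.count_pos_iff (l := t)]
    constructor
    · intro hc
      have hne : ¬ (w.get? c = none) := by
        rw [PySem.Dict.get?_eq_none_iff_not_mem_keys]; simp [hc]
      rw [hget c] at hne
      by_cases h0 : t.count c = 0
      · simp [h0] at hne
      · omega
    · intro hc
      have h0 : t.count c ≠ 0 := by omega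
      have : w.get? c = some ((t.count c : Int)) := by rw [hget c]; simp [h0]
      by_contra hmem
      rw [← PySem.Dict.get?_eq_none_iff_not_mem_keys] at hmem
      rw [this] at hmem
      cases hmem
  have h1 : w.keys.toFinset = t.toFinset := by
    ext c; simp only [List.mem_toFinset]; exact hkeys c
  have h2 : w.keys.length = w.size := by
    simp [PySem.Dict.keys, PySem.Dict.size]
  rw [← h2, ← List.toFinset_card_of_nodup hnd, h1]

theorem pvRep_insert_inc {w : PySem.Dict Char Int} {t : List Char} (h : pvRep w t) (c : Char) :
    pvRep (w.insert c (w.getD c 0 + 1)) (t ++ [c]) := by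
  obtain ⟨hnd, hget⟩ := h
  refine ⟨PySem.Dict.nodup_keys_insert _ _ _ hnd, fun c' => ?_⟩
  rw [PySem.Dict.get?_insert]
  have hcnt : (t ++ [c]).count c' = t.count c' + (if c' = c then 1 else 0) := by
    rw [List.count_append]
    by_cases hc : c' = c
    · subst hc; simp
    · have h1 : List.count c' [c] = 0 := List.count_eq_zero.mpr (by simp [hc])
      rw [h1, if_neg hc]
  by_cases hc : c' = c
  · subst hc
    have hD : w.getD c' 0 = ((t.count c' : Int)) := by
      rw [PySem.Dict.getD_eq_get?_getD, hget c']
      by_cases h0 : t.count c' = 0 <;> simp [h0]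
    simp only [if_pos rfl, hcnt, hD]
    have h1 : ¬ (t.count c' + 1 = 0) := by omega
    simp [h1]
  · simp only [if_neg hc, hcnt, hget c']
    simp

theorem pvRep_dec {w : PySem.Dict Char Int} {c : Char} {t : List Char} (h : pvRep w (c :: t)) :
    pvRep (let w' := w.insert c (w.getD c 0 - 1);
           if w'.getD c 0 = 0 then w'.erase c else w') t := by
  obtain ⟨hnd, hget⟩ := h
  have hcnt : (c :: t).count c = t.count c + 1 := by simp
  have hD : w.getD c 0 = ((t.count c : Int)) + 1 := by
    rw [PySem.Dict.getD_eq_get?_getD, hget c, hcnt]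
    simp
  have hval : w.getD c 0 - 1 = ((t.count c : Int)) := by rw [hD]; ring
  have hD' : (w.insert c (w.getD c 0 - 1)).getD c 0 = ((t.count c : Int)) := by
    rw [PySem.Dict.getD_insert]; simp [hval]
  simp only [hD']
  by_cases h0 : t.count c = 0
  · rw [if_pos (by simp [h0])]
    refine ⟨(pvKeys_erase_sublist _ _).nodup (PySem.Dict.nodup_keys_insert _ _ _ hnd), fun c' => ?_⟩
    by_cases hc : c' = c
    · subst hc; rw [pvGet?_erase_self]; simp [h0]
    · rw [pvGet?_erase_of_ne _ hc, PySem.Dict.get?_insert, if_neg hc, hget c']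
      rw [List.count_cons_of_ne (fun hh => hc hh.symm)]
  · rw [if_neg (by simpa using fun hh => h0 (by exact_mod_cast hh))]
    refine ⟨PySem.Dict.nodup_keys_insert _ _ _ hnd, fun c' => ?_⟩
    rw [PySem.Dict.get?_insert]
    by_cases hc : c' = c
    · subst hc; simp [h0, hval]
    · rw [if_neg hc, hget c']
      rw [List.count_cons_of_ne (fun hh => hc hh.symm)]

-- model of A's shrink loop over Nat state
def pvShrink (cs : List Char) (K : Nat) (r : Nat) : Nat → Nat × Option Nat → Nat × Option Nat
  | 0, st => st
  | fuel+1, (left, mw) =>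
    if K ≤ pvD cs left (r+1) then
      pvShrink cs K r fuel (left+1, some (match mw with | none => r+1-left | some m => min m (r+1-left)))
    else (left, mw)

-- mid-loop invariant (bound = r+1 while processing right end r)
def pvJ (cs : List Char) (K bound left : Nat) (mw : Option Nat) : Prop :=
  left ≤ bound ∧
  (∀ m, mw = some m → ∃ l r', l < r' ∧ r' ≤ bound ∧ K ≤ pvD cs l r' ∧ m = r' - l) ∧
  (∀ l r', l < r' → r' ≤ bound → K ≤ pvD cs l r' → (r' < bound ∨ l < left) →
    ∃ m, mw = some m ∧ m ≤ r' - l) ∧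
  (∀ l, l < left → ∃ r', l < r' ∧ r' ≤ bound ∧ K ≤ pvD cs l r')

-- invariant before processing right end r (prefix of length r fully processed)
def pvP (cs : List Char) (K r left : Nat) (mw : Option Nat) : Prop :=
  left ≤ r ∧ pvD cs left r < K ∧
  (∀ m, mw = some m → ∃ l r', l < r' ∧ r' ≤ r ∧ K ≤ pvD cs l r' ∧ m = r' - l) ∧
  (∀ l r', l < r' → r' ≤ r → K ≤ pvD cs l r' → ∃ m, mw = some m ∧ m ≤ r' - l) ∧
  (∀ l, l < left → ∃ r', l < r' ∧ r' ≤ r ∧ K ≤ pvD cs l r')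

theorem pvShrink_inv {cs : List Char} {K r : Nat} (hK : 1 ≤ K) :
    ∀ fuel left mw, r + 1 ≤ fuel + left → pvJ cs K (r+1) left mw →
      pvP cs K (r+1) (pvShrink cs K r fuel (left, mw)).1 (pvShrink cs K r fuel (left, mw)).2 := by
  intro fuel
  induction fuel with
  | zero =>
    intro left mw hfuel hJ
    obtain ⟨hJ0, hJ1, hJ2, hJ3⟩ := hJ
    have hleft : left = r + 1 := by omega
    simp only [pvShrink]
    refine ⟨by omega, ?_, hJ1, fun l r' hlr hr hq => ?_, hJ3⟩
    · subst hleft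
      have : pvSeg cs (r+1) (r+1) = [] := pvSeg_eq_nil (Nat.le_refl _)
      simpa [pvD, this] using hK
    · refine hJ2 l r' hlr hr hq ?_
      right; omega
  | succ fuel ih =>
    intro left mw hfuel hJ
    obtain ⟨hJ0, hJ1, hJ2, hJ3⟩ := hJ
    simp only [pvShrink]
    by_cases hc : K ≤ pvD cs left (r+1)
    · rw [if_pos hc]
      have hpos : left < r + 1 ∧ left < cs.length := pvD_pos_lt (by omega)
      set newLen := r + 1 - left with hnl
      refine ih (left+1) _ (by omega) ⟨by omega, ?_, ?_, ?_⟩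
      · -- achieved
        intro m hm
        rcases mw with _ | m0
        · simp only at hm
          injection hm with hm'
          exact ⟨left, r+1, by omega, by omega, hc, by omega⟩
        · simp only at hm
          injection hm with hm'
          rcases Nat.le_total m0 newLen with hmin | hmin
          · rw [min_eq_left hmin] at hm'
            obtain ⟨l, r', a, b, c, d⟩ := hJ1 m0 rfl
            exact ⟨l, r', a, b, c, by omega⟩
          · rw [min_eq_right hmin] at hm'
            exact ⟨left, r+1, by omega, by omega, hc, by omega⟩
      · -- dominates
        intro l r' hlr hr hq hor
        by_cases hold : r' < r + 1 ∨ l < left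
        · obtain ⟨m0, hm0, hle⟩ := hJ2 l r' hlr hr hq hold
          rcases mw with _ | mw0
          · cases hm0
          · injection hm0 with hm0'
            refine ⟨_, rfl, ?_⟩
            rw [← hm0'] at hle
            show min mw0 newLen ≤ r' - l
            have := min_le_left mw0 newLen
            omega
        · rcases not_or.mp hold with ⟨hno1, hno2⟩
          have e1 : r' = r + 1 := by omega
          have e2 : l = left := by
            rcases hor with h | h
            · exact absurd h hno1
            · omega
          subst e1; subst e2
          rcases mw with _ | mw0
          · refine ⟨_, rfl, ?_⟩
            show newLen ≤ r + 1 - l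
            omega
          · refine ⟨_, rfl, ?_⟩
            show min mw0 newLen ≤ r + 1 - l
            have := min_le_right mw0 newLen
            omega
      · -- all l < left+1 have a qualifying window
        intro l hl
        rcases Nat.lt_or_ge l left with h | h
        · exact hJ3 l h
        · have : l = left := by omega
          subst this
          exact ⟨r+1, by omega, by omega, hc⟩
    · rw [if_neg hc]
      refine ⟨hJ0, ?_, hJ1, fun l r' hlr hr hq => ?_, hJ3⟩
      · show pvD cs left (r+1) < K
        omega
      by_cases hl : l < left
      · exact hJ2 l r' hlr hr hq (Or.inr hl)
      · rcases Nat.lt_or_ge r' (r+1) with h | h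
        · exact hJ2 l r' hlr hr hq (Or.inl h)
        · have hr1 : r' = r + 1 := by omega
          subst hr1
          have : pvD cs l (r+1) ≤ pvD cs left (r+1) := pvD_antitone (by omega)
          omega

theorem pvP_start {cs : List Char} {K : Nat} (hK : 1 ≤ K) : pvP cs K 0 0 none := by
  refine ⟨Nat.le_refl _, ?_, ?_, ?_, ?_⟩
  · simpa [pvD, pvSeg] using hK
  · intro m hm; cases hm
  · intro l r' h1 h2; omega
  · intro l hl; omega

theorem pvP_to_J {cs : List Char} {K r left : Nat} {mw : Option Nat} (h : pvP cs K r left mw) :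
    pvJ cs K (r+1) left mw := by
  obtain ⟨h1, h2, h3, h4, h5⟩ := h
  refine ⟨by omega, fun m hm => ?_, fun l r' hlr hr hq hor => ?_, fun l hl => ?_⟩
  · obtain ⟨l, r', a, b, c, d⟩ := h3 m hm
    exact ⟨l, r', a, by omega, c, d⟩
  · rcases Nat.lt_or_ge r' (r+1) with hcase | hcase
    · exact h4 l r' hlr (by omega) hq
    · have hr1 : r' = r + 1 := by omega
      have hl : l < left := by
        rcases hor with h | h
        · omega
        · exact h
      subst hr1
      obtain ⟨r'', a, b, c⟩ := h5 l hl
      obtain ⟨m, hm, hle⟩ := h4 l r'' a b c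
      exact ⟨m, hm, by omega⟩
  · obtain ⟨r', a, b, c⟩ := h5 l hl
    exact ⟨r', a, by omega, c⟩

-- port A's shrink loop tracks the model, carrying the dict representation
theorem aShrink_model {cs : List Char} {k : Int} (hk : 1 ≤ k) {r : Nat} :
    ∀ (fuel : Nat) (left : Nat) (mw : Option Nat) (w : PySem.Dict Char Int),
      left ≤ r + 1 → r < cs.length → pvRep w (pvSeg cs left (r+1)) →
      ∃ w', aShrink cs k (r : Int) fuel ((left : Int), mw.map (fun m => (m : Int)), w) =
              ((((pvShrink cs k.toNat r fuel (left, mw)).1 : Nat) : Int),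
               (pvShrink cs k.toNat r fuel (left, mw)).2.map (fun m => (m : Int)), w') ∧
            pvRep w' (pvSeg cs (pvShrink cs k.toNat r fuel (left, mw)).1 (r+1)) ∧
            (pvShrink cs k.toNat r fuel (left, mw)).1 ≤ r + 1 := by
  intro fuel
  induction fuel with
  | zero =>
    intro left mw w hleft hr hrep
    exact ⟨w, rfl, hrep, hleft⟩
  | succ fuel ih =>
    intro left mw w hleft hr hrep
    have hK : 1 ≤ k.toNat := by omega
    have hsize : w.size = pvD cs left (r+1) := pvRep_size hrep
    simp only [aShrink, pvShrink]
    by_cases hc : k.toNat ≤ pvD cs left (r+1)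
    · rw [if_pos (by rw [hsize]; omega), if_pos hc]
      have hpos := pvD_pos_lt (show 0 < pvD cs left (r+1) by omega)
      have hln : left < cs.length := hpos.2
      have hlr : left < r + 1 := hpos.1
      have hlc : PySem.List.pyGetD cs ((left : Int)) ' ' = cs[left] := by
        rw [PySem.List.pyGetD_natCast]
        exact List.getD_eq_getElem cs ' ' hln
      have hsegc : pvSeg cs left (r+1) = cs[left] :: pvSeg cs (left+1) (r+1) :=
        pvSeg_cons hlr hln
      rw [hsegc] at hrep
      have hrep' := pvRep_dec hrep
      have hmw : (some (match mw.map (fun m => (m : Int)) with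
                  | none => (r : Int) - (left : Int) + 1
                  | some m => min m ((r : Int) - (left : Int) + 1)) : Option Int) =
          (some (match mw with
                  | none => r + 1 - left
                  | some m => min m (r + 1 - left)) : Option Nat).map (fun m => (m : Int)) := by
        rcases mw with _ | m0
        · congr 1
          show (r : Int) - (left : Int) + 1 = ((r + 1 - left : Nat) : Int)
          omega
        · congr 1
          rw [show ((r : Int) - (left : Int) + 1) = (((r + 1 - left : Nat)) : Int) by omega]
          show min ((m0 : Nat) : Int) (((r + 1 - left : Nat)) : Int) = (((min m0 (r + 1 - left) : Nat)) : Int)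
          exact (Nat.cast_min m0 (r + 1 - left)).symm
      rw [hlc, hmw, show ((left : Int) + 1) = (((left + 1 : Nat)) : Int) by push_cast; ring]
      exact ih (left + 1) _ _ (by omega) hr hrep'
    · rw [if_neg (by rw [hsize]; omega), if_neg hc]
      exact ⟨w, rfl, hrep, hleft⟩

-- B: the seen set represents the distinct characters of a segment t
def pvS (seen : PySem.Set Char) (t : List Char) : Prop :=
  seen.Nodup ∧ ∀ c : Char, c ∈ seen ↔ c ∈ t

theorem pvS_add {seen : PySem.Set Char} {t : List Char} (h : pvS seen t) (c : Char) :
    pvS (PySem.Set.add seen c) (c :: t) := by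
  obtain ⟨hnd, hmem⟩ := h
  refine ⟨PySem.Set.nodup_add seen c hnd, fun c' => ?_⟩
  rw [PySem.Set.mem_add, hmem c', List.mem_cons]
  tauto

theorem pvS_len {seen : PySem.Set Char} {t : List Char} (h : pvS seen t) :
    PySem.Set.len seen = (t.toFinset.card : Int) := by
  obtain ⟨hnd, hmem⟩ := h
  have h1 : seen.toFinset = t.toFinset := by
    ext c; simp only [List.mem_toFinset]; exact hmem c
  have h2 : seen.length = seen.toFinset.card := (List.toFinset_card_of_nodup hnd).symm
  simp only [PySem.Set.len]
  rw [h2, h1]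

-- characterization of B's inner backward scan
theorem bInner_spec {cs : List Char} {k : Int} (hk : 1 ≤ k) {r : Nat} (hr : r < cs.length) :
    ∀ (l0 : Nat) (seen : PySem.Set Char) (best : Int), l0 ≤ r →
      pvS seen (pvSeg cs (l0+1) (r+1)) →
      ((∀ l, l ≤ l0 → pvD cs l (r+1) < k.toNat) ∧
        bInner cs k (r : Int) (PySem.List.pyRange (l0 : Int) (-1) (-1)) seen best = best) ∨
      (∃ L, L ≤ l0 ∧ k.toNat ≤ pvD cs L (r+1) ∧ (∀ l, l ≤ l0 → k.toNat ≤ pvD cs l (r+1) → l ≤ L) ∧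
        bInner cs k (r : Int) (PySem.List.pyRange (l0 : Int) (-1) (-1)) seen best =
          (if best = 0 ∨ (((r+1-L : Nat) : Int)) < best then ((r+1-L : Nat) : Int) else best)) := by
  intro l0
  induction l0 with
  | zero =>
    intro seen best _ hS
    rw [PySem.List.pyRange_neg_one_cons (by omega : (-1 : Int) < ((0 : Nat) : Int))]
    simp only [bInner]
    have hln : (0 : Nat) < cs.length := by omega
    have hlc : PySem.List.pyGetD cs (((0 : Nat)) : Int) ' ' = cs[(0 : Nat)] := by
      rw [PySem.List.pyGetD_natCast]
      exact List.getD_eq_getElem cs ' ' hln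
    have hS' : pvS (PySem.Set.add seen (PySem.List.pyGetD cs (((0:Nat)) : Int) ' '))
        (pvSeg cs 0 (r+1)) := by
      rw [hlc, pvSeg_cons (by omega) hln]
      exact pvS_add hS _
    have hlen := pvS_len hS'
    by_cases hc : k.toNat ≤ pvD cs 0 (r+1)
    · right
      refine ⟨0, Nat.le_refl _, hc, fun l hl _ => hl, ?_⟩
      rw [if_pos (by rw [hlen]; show k ≤ ((pvD cs 0 (r+1) : Nat) : Int); omega)]
      have : (r : Int) - ((0:Nat) : Int) + 1 = (((r + 1 - 0 : Nat)) : Int) := by omega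
      rw [this]
    · left
      refine ⟨fun l hl => by rw [Nat.le_zero.mp hl]; omega, ?_⟩
      rw [if_neg (by rw [hlen]; show ¬ (k ≤ ((pvD cs 0 (r+1) : Nat) : Int)); omega)]
      rw [show ((0:Nat) : Int) - 1 = (-1 : Int) by omega,
        PySem.List.pyRange_neg_one_eq_nil (by omega)]
      rfl
  | succ m ihm =>
    intro seen best hl0 hS
    rw [PySem.List.pyRange_neg_one_cons (by omega : (-1 : Int) < ((m+1 : Nat) : Int))]
    simp only [bInner]
    have hln : m + 1 < cs.length := by omega
    have hlc : PySem.List.pyGetD cs (((m+1 : Nat)) : Int) ' ' = cs[m+1] := by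
      rw [PySem.List.pyGetD_natCast]
      exact List.getD_eq_getElem cs ' ' hln
    have hS' : pvS (PySem.Set.add seen (PySem.List.pyGetD cs (((m+1:Nat)) : Int) ' '))
        (pvSeg cs (m+1) (r+1)) := by
      rw [hlc, pvSeg_cons (by omega) hln]
      exact pvS_add hS _
    have hlen := pvS_len hS'
    by_cases hc : k.toNat ≤ pvD cs (m+1) (r+1)
    · right
      refine ⟨m+1, Nat.le_refl _, hc, fun l hl _ => hl, ?_⟩
      rw [if_pos (by rw [hlen]; show k ≤ ((pvD cs (m+1) (r+1) : Nat) : Int); omega)]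
      have : (r : Int) - ((m+1:Nat) : Int) + 1 = (((r + 1 - (m+1) : Nat)) : Int) := by omega
      rw [this]
    · rw [if_neg (by rw [hlen]; show ¬ (k ≤ ((pvD cs (m+1) (r+1) : Nat) : Int)); omega)]
      rw [show ((m+1:Nat) : Int) - 1 = ((m : Nat) : Int) by omega]
      rcases ihm _ best (by omega) hS' with ⟨hall, heq⟩ | ⟨L, hL, hq, hmax, heq⟩
      · left
        refine ⟨fun l hl => ?_, heq⟩
        rcases Nat.lt_or_ge l (m+1) with h | h
        · exact hall l (by omega)
        · have : l = m + 1 := by omega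
          subst this; omega
      · right
        refine ⟨L, by omega, hq, fun l hl hql => ?_, heq⟩
        rcases Nat.lt_or_ge l (m+1) with h | h
        · exact hmax l (by omega) hql
        · have : l = m + 1 := by omega
          subst this
          exact absurd hql hc

def pvB (cs : List Char) (K r : Nat) (best : Int) : Prop :=
  (best ≠ 0 → ∃ l r', l < r' ∧ r' ≤ r ∧ K ≤ pvD cs l r' ∧ best = ((r' - l : Nat) : Int)) ∧
  (∀ l r', l < r' → r' ≤ r → K ≤ pvD cs l r' → best ≠ 0 ∧ best ≤ ((r' - l : Nat) : Int))

theorem pvB_step {cs : List Char} {k : Int} (hk : 1 ≤ k) {r : Nat} (hr : r < cs.length)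
    {best : Int} (h : pvB cs k.toNat r best) :
    pvB cs k.toNat (r+1)
      (bInner cs k (r : Int) (PySem.List.pyRange (r : Int) (-1) (-1)) PySem.Set.empty best) := by
  have hS0 : pvS PySem.Set.empty (pvSeg cs (r+1) (r+1)) := by
    refine ⟨List.nodup_nil, fun c => ?_⟩
    rw [pvSeg_eq_nil (Nat.le_refl _)]
    simp [PySem.Set.empty]
  rcases bInner_spec hk hr r PySem.Set.empty best (Nat.le_refl _) hS0 with
    ⟨hall, heq⟩ | ⟨L, hL, hq, hmax, heq⟩
  · rw [heq]
    obtain ⟨h1, h2⟩ := h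
    refine ⟨fun hb => ?_, fun l r' hlr hr' hql => ?_⟩
    · obtain ⟨l, r', a, b, c, d⟩ := h1 hb
      exact ⟨l, r', a, by omega, c, d⟩
    · rcases Nat.lt_or_ge r' (r+1) with hcase | hcase
      · exact h2 l r' hlr (by omega) hql
      · have : r' = r + 1 := by omega
        subst this
        exact absurd hql (by exact Nat.not_le.mpr (hall l (by omega)))
  · rw [heq]
    obtain ⟨h1, h2⟩ := h
    have hcand_pos : (0 : Int) < ((r + 1 - L : Nat) : Int) := by omega
    constructor
    · intro hb
      split_ifs at hb ⊢ with hif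
      · exact ⟨L, r+1, by omega, Nat.le_refl _, hq, rfl⟩
      · obtain ⟨l, r', a, b, c, d⟩ := h1 (by tauto)
        exact ⟨l, r', a, by omega, c, d⟩
    · intro l r' hlr hr' hql
      rcases Nat.lt_or_ge r' (r+1) with hcase | hcase
      · obtain ⟨hb0, hble⟩ := h2 l r' hlr (by omega) hql
        split_ifs with hif
        · rcases hif with hif | hif
          · exact absurd hif hb0
          · exact ⟨by omega, by omega⟩
        · exact ⟨hb0, hble⟩
      · have : r' = r + 1 := by omega
        subst this
        have hlL : l ≤ L := hmax l (by omega) hql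
        have hcle : ((r + 1 - L : Nat) : Int) ≤ ((r + 1 - l : Nat) : Int) := by omega
        split_ifs with hif
        · exact ⟨by omega, by omega⟩
        · have : ¬ (best = 0) ∧ ¬ (((r + 1 - L : Nat) : Int) < best) := by tauto
          exact ⟨this.1, by omega⟩

-- outer folds
theorem pvA_fold {cs : List Char} {k : Int} (hk : 1 ≤ k) :
    ∀ m, m ≤ cs.length →
      ∃ (left : Nat) (mw : Option Nat) (w : PySem.Dict Char Int),
        (List.range m).foldl
          (fun (st : Int × Option Int × PySem.Dict Char Int) (j : Nat) =>
            let c := PySem.List.pyGetD cs (j : Int) ' '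
            let w := st.2.2.insert c (st.2.2.getD c 0 + 1)
            aShrink cs k (j : Int) (cs.length + 1) (st.1, st.2.1, w))
          (0, none, PySem.Dict.empty)
          = ((left : Int), mw.map (fun m => (m : Int)), w) ∧
        pvRep w (pvSeg cs left m) ∧ pvP cs k.toNat m left mw := by
  have hK : 1 ≤ k.toNat := by omega
  intro m
  induction m with
  | zero =>
    intro _
    refine ⟨0, none, PySem.Dict.empty, by norm_num, ?_, pvP_start hK⟩
    rw [pvSeg_eq_nil (Nat.le_refl 0)]
    exact pvRep_empty
  | succ m ih =>
    intro hm
    obtain ⟨left, mw, w, heq, hrep, hP⟩ := ih (by omega)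
    rw [List.range_succ, List.foldl_append, List.foldl_cons, List.foldl_nil, heq]
    dsimp only
    have hln : m < cs.length := by omega
    have hlc : PySem.List.pyGetD cs ((m : Nat) : Int) ' ' = cs[m] := by
      rw [PySem.List.pyGetD_natCast]
      exact List.getD_eq_getElem cs ' ' hln
    rw [hlc]
    have hrep1 : pvRep (w.insert cs[m] (w.getD cs[m] 0 + 1)) (pvSeg cs left (m+1)) := by
      rw [pvSeg_snoc hP.1 hln]
      exact pvRep_insert_inc hrep cs[m]
    obtain ⟨w', heq2, hrep2, hb⟩ :=
      aShrink_model hk (r := m) (cs.length + 1) left mw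
        (w.insert cs[m] (w.getD cs[m] 0 + 1)) (Nat.le_succ_of_le hP.1) hln hrep1
    refine ⟨_, _, w', heq2, hrep2, ?_⟩
    exact pvShrink_inv hK (cs.length + 1) left mw (by omega) (pvP_to_J hP)

theorem pvB_fold {cs : List Char} {k : Int} (hk : 1 ≤ k) :
    ∀ m, m ≤ cs.length →
      pvB cs k.toNat m
        ((List.range m).foldl
          (fun (best : Int) (j : Nat) =>
            bInner cs k (j : Int) (PySem.List.pyRange (j : Int) (-1) (-1)) PySem.Set.empty best)
          0) := by
  intro m
  induction m with
  | zero =>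
    intro _
    refine ⟨fun hb => absurd rfl hb, fun l r' hlr hr' hql => ?_⟩
    omega
  | succ m ih =>
    intro hm
    rw [List.range_succ, List.foldl_append, List.foldl_cons, List.foldl_nil]
    exact pvB_step hk (by omega) (ih (by omega))

theorem pv_final {cs : List Char} {k : Int} {left : Nat} {mw : Option Nat} {best : Int}
    (hA : pvP cs k.toNat cs.length left mw) (hB : pvB cs k.toNat cs.length best) :
    (match mw.map (fun m => (m : Int)) with | none => (0 : Int) | some m => m) = best := by
  obtain ⟨hP1, hP2, hP3, hP4, hP5⟩ := hA
  obtain ⟨hB1, hB2⟩ := hB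
  rcases mw with _ | m
  · show (0 : Int) = best
    by_contra hne
    have hb0 : best ≠ 0 := fun h => hne (by rw [h])
    obtain ⟨l, r', a, b, c, d⟩ := hB1 hb0
    obtain ⟨m, hm, _⟩ := hP4 l r' a b c
    cases hm
  · show (m : Int) = best
    obtain ⟨l, r', a, b, c, d⟩ := hP3 m rfl
    obtain ⟨hb0, hble⟩ := hB2 l r' a b c
    obtain ⟨l2, r2, a2, b2, c2, d2⟩ := hB1 hb0
    obtain ⟨m2, hm2, hle2⟩ := hP4 l2 r2 a2 b2 c2
    injection hm2 with hm2'
    omega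

theorem pv_main (s : String) (k : Int) : minimum_window s k = minimum_window_alt s k := by
  unfold minimum_window minimum_window_alt
  by_cases hg : s.toList = [] ∨ k ≤ 0
  · rw [if_pos hg, if_pos hg]
  · rw [if_neg hg, if_neg hg]
    have hk : 1 ≤ k := by
      rcases not_or.mp hg with ⟨_, h2⟩
      omega
    have hrange : PySem.List.pyRange 0 (s.toList.length : Int) 1 =
        (List.range s.toList.length).map (fun j : Nat => (j : Int)) := by
      rw [PySem.List.pyRange_one]
      simp
    rw [hrange, List.foldl_map, List.foldl_map]
    obtain ⟨left, mw, w, heqA, _, hP⟩ := pvA_fold (cs := s.toList) hk s.toList.length (Nat.le_refl _)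
    rw [show (fun (st : Int × Option Int × PySem.Dict Char Int) (j : Nat) =>
          (fun (st : Int × Option Int × PySem.Dict Char Int) (right : Int) =>
            let c := PySem.List.pyGetD s.toList right ' '
            let w := st.2.2.insert c (st.2.2.getD c 0 + 1)
            aShrink s.toList k right (s.toList.length + 1) (st.1, st.2.1, w)) st ((j : Int))) =
        (fun (st : Int × Option Int × PySem.Dict Char Int) (j : Nat) =>
          let c := PySem.List.pyGetD s.toList ((j : Int)) ' '
          let w := st.2.2.insert c (st.2.2.getD c 0 + 1)
          aShrink s.toList k ((j : Int)) (s.toList.length + 1) (st.1, st.2.1, w))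
      from by funext st j; rfl]
    rw [heqA]
    exact pv_final hP (pvB_fold (cs := s.toList) hk s.toList.length (Nat.le_refl _))

-- ===== VERDICT (by name: the statement is the Claim_ definition above) =====
theorem minimum_window_spec : Claim_equal_minimum_window := by
  intro s k _
  show minimum_window s k = minimum_window_alt s k
  exact pv_main s k
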